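-- pv_equiv track=rewrite | github.com/TomWyllie/folkfriend | utils/folkfriend/data/abc.py | midi_to_abc
-- ===== SOURCE A (Python) =====
-- BASE_MAP = {
--     72: 'c',
--     73: '^c',
--     74: 'd',
--     75: '^d',
--     76: 'e',
--     77: 'f',
--     78: '^f',
--     79: 'g',
--     80: '^g',
--     81: 'a',
--     82: '^a',
--     83: 'b',
-- }
--
-- def midi_to_abc(midi):
--     apos = 0
--     commas = 0
--
--     while midi >= 84:
--         apos += 1
--         midi -= 12
--
--     while midi <= 71:
--         commas += 1
--         midi += 12
--
--     base = BASE_MAP[midi]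
--
--     if commas >= 1:
--         base = base.upper()
--         commas -= 1
--
--     return base + ',' * commas + "'" * apos
-- ===== SOURCE B (Python) =====
-- BASES = ['c', '^c', 'd', '^d', 'e', 'f', '^f', 'g', '^g', 'a', '^a', 'b']
--
-- def midi_to_abc(midi):
--     octave, index = divmod(midi - 72, 12)
--     base = BASES[index]
--     apos = octave if octave > 0 else 0
--     commas = -octave if octave < 0 else 0
--     if commas >= 1:
--         base = base.upper()
--         commas -= 1
--     return base + ',' * commas + "'" * apos
-- ===== Notes on version B (the rewrite author's own statement) =====
-- stated objective: faster
-- what changed: Replaced the two octave-shifting while-loops (O(|midi|/12) iterations) with a single divmod(midi-72, 12): the quotient gives the apostrophe/comma count directly and the remainder indexes a12-entry list instead of the dict keyed by 72..83.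
import Mathlib
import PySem

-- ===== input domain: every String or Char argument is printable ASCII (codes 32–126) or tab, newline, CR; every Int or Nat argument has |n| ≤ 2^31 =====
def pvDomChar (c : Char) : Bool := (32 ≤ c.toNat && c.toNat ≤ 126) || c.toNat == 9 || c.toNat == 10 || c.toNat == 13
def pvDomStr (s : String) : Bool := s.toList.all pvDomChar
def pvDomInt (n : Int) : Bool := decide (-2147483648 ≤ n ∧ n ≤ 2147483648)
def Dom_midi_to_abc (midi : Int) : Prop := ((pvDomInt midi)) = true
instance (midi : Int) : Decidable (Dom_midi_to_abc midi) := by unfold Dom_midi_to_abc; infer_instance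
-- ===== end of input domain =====

-- B replaces A's two octave-shifting while-loops by one divmod(midi-72,12) (faster: O(1) arithmetic
-- instead of O(|midi|/12) loop iterations before building the output string).

-- ===== PORT A =====
def pvBaseMap : PySem.Dict Int String :=
  PySem.Dict.ofList [(72, "c"), (73, "^c"), (74, "d"), (75, "^d"), (76, "e"), (77, "f"),
    (78, "^f"), (79, "g"), (80, "^g"), (81, "a"), (82, "^a"), (83, "b")]

-- while midi >= 84: apos += 1; midi -= 12
def midiLoop1 (midi apos : Int) : Int × Int :=
  if h : 84 ≤ midi then midiLoop1 (midi - 12) (apos + 1) else (midi, apos)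
termination_by (midi - 83).toNat
decreasing_by omega

-- while midi <= 71: commas += 1; midi += 12
def midiLoop2 (midi commas : Int) : Int × Int :=
  if h : midi ≤ 71 then midiLoop2 (midi + 12) (commas + 1) else (midi, commas)
termination_by (72 - midi).toNat
decreasing_by omega

def midi_to_abc (midi : Int) : String :=
  let p1 := midiLoop1 midi 0
  let p2 := midiLoop2 p1.1 0
  -- BASE_MAP[midi]: the loops leave midi in 72..83, so the KeyError branch is unreachable (getD "" is never taken)
  let base := (pvBaseMap.get? p2.1).getD ""
  let bc := if 1 ≤ p2.2 then (PySem.Str.upper base, p2.2 - 1) else (base, p2.2)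
  String.mk (bc.1.toList ++ List.replicate bc.2.toNat ',' ++ List.replicate p1.2.toNat '\'')

-- ===== PORT B =====
def pvBases : List String := ["c", "^c", "d", "^d", "e", "f", "^f", "g", "^g", "a", "^a", "b"]

def midi_to_abc_alt (midi : Int) : String :=
  let octave := PySem.Int.floordiv (midi - 72) 12
  let index := PySem.Int.mod (midi - 72) 12
  -- BASES[index]: index is in 0..11, so the IndexError branch is unreachable (getD "" is never taken)
  let base := (PySem.List.pyGet? pvBases index).getD ""
  let apos := if 0 < octave then octave else 0
  let commas := if octave < 0 then -octave else 0
  let bc := if 1 ≤ commas then (PySem.Str.upper base, commas - 1) else (base, commas)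
  String.mk (bc.1.toList ++ List.replicate bc.2.toNat ',' ++ List.replicate apos.toNat '\'')

-- ===== PRECONDITION & SPEC =====
def Spec_midi_to_abc (midi : Int) (out : String) : Prop := out = midi_to_abc_alt midi
instance (midi : Int) (out : String) : Decidable (Spec_midi_to_abc midi out) := by unfold Spec_midi_to_abc; infer_instance

-- ===== CLAIM (what is proved, stated in full; the proofs are below) =====
def Claim_equal_midi_to_abc : Prop := ∀ (midi : Int), Dom_midi_to_abc midi → Spec_midi_to_abc midi (midi_to_abc midi)

-- ===== LEMMAS AND PROOFS =====

lemma midiLoop1_eq (midi apos : Int) :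
    midiLoop1 midi apos =
      if 84 ≤ midi then (72 + (midi - 72) % 12, apos + (midi - 72) / 12) else (midi, apos) := by
  induction midi, apos using midiLoop1.induct with
  | case1 midi apos h ih =>
    rw [midiLoop1]
    simp only [dif_pos h, if_pos h, ih]
    split_ifs with h4
    · refine Prod.ext ?_ ?_ <;> simp <;> omega
    · refine Prod.ext ?_ ?_ <;> simp <;> omega
  | case2 midi apos h =>
    rw [midiLoop1]
    simp only [dif_neg h, if_neg h]

lemma midiLoop2_eq (midi commas : Int) :
    midiLoop2 midi commas =
      if midi ≤ 71 then (72 + (midi - 72) % 12, commas - (midi - 72) / 12) else (midi, commas) := by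
  induction midi, commas using midiLoop2.induct with
  | case1 midi commas h ih =>
    rw [midiLoop2]
    simp only [dif_pos h, if_pos h, ih]
    split_ifs with h4
    · refine Prod.ext ?_ ?_ <;> simp <;> omega
    · refine Prod.ext ?_ ?_ <;> simp <;> omega
  | case2 midi commas h =>
    rw [midiLoop2]
    simp only [dif_neg h, if_neg h]

lemma base_lookup_eq (r : Int) (h0 : 0 ≤ r) (h1 : r < 12) :
    (pvBaseMap.get? (72 + r)).getD "" = (PySem.List.pyGet? pvBases r).getD "" := by
  interval_cases r <;> decide

theorem midi_to_abc_spec : Claim_equal_midi_to_abc := by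
  intro midi _
  unfold Spec_midi_to_abc midi_to_abc midi_to_abc_alt
  rw [midiLoop1_eq, PySem.Int.floordiv_eq_ediv_of_pos (by norm_num),
      PySem.Int.mod_eq_emod_of_pos (by norm_num)]
  have hr0 : 0 ≤ (midi - 72) % 12 := Int.emod_nonneg _ (by norm_num)
  have hr1 : (midi - 72) % 12 < 12 := Int.emod_lt_of_pos _ (by norm_num)
  have hb := base_lookup_eq ((midi - 72) % 12) hr0 hr1
  by_cases h84 : 84 ≤ midi
  · have hq : 1 ≤ (midi - 72) / 12 := by omega
    simp only [if_pos h84]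
    rw [midiLoop2_eq]
    simp only [if_neg (by omega : ¬ (72 + (midi - 72) % 12 ≤ 71))]
    rw [hb]
    simp only [if_neg (by omega : ¬ (1:Int) ≤ 0), if_pos (by omega : (0:Int) < (midi - 72) / 12),
      if_neg (by omega : ¬ (midi - 72) / 12 < 0), zero_add]
  · simp only [if_neg h84]
    rw [midiLoop2_eq]
    by_cases h71 : midi ≤ 71
    · have hq : (midi - 72) / 12 ≤ -1 := by omega
      simp only [if_pos h71]
      rw [hb]
      simp only [if_pos (by omega : (1:Int) ≤ 0 - (midi - 72) / 12),
        if_neg (by omega : ¬ (0:Int) < (midi - 72) / 12),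
        if_pos (by omega : (midi - 72) / 12 < 0),
        if_pos (by omega : (1:Int) ≤ -((midi - 72) / 12))]
      have : (0:Int) - (midi - 72) / 12 - 1 = -((midi - 72) / 12) - 1 := by ring
      rw [this]
    · have hq : (midi - 72) / 12 = 0 := by omega
      have hr : (midi - 72) % 12 = midi - 72 := by omega
      simp only [if_neg h71]
      rw [hr] at hb
      rw [show (72 : Int) + (midi - 72) = midi by ring] at hb
      rw [hb, hr, hq]
      simp
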